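-- pv_equiv track=rewrite | github.com/bmcdonough/esphome_python_bluetooth_proxy | src/esphome_bluetooth_proxy/ble_connection.py | _convert_properties
-- ===== SOURCE A (Python) =====
-- from typing import Callable, Dict, List, Optional
--
-- def _convert_properties(bleak_properties: List[str]) -> int:
--     """Convert bleak properties to ESPHome format.
--
--     Args:
--         bleak_properties: List of property strings from bleak
--
--     Returns:
--         int: Properties as bit flags
--     """
--     properties = 0
--     prop_map = {
--         "read": 0x02,
--         "write-without-response": 0x04,
--         "write": 0x08,
--         "notify": 0x10,
--         "indicate": 0x20,
--     }
--
--     for prop in bleak_properties: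
--         if prop in prop_map:
--             properties |= prop_map[prop]
--
--     return properties
-- ===== SOURCE B (Python) =====
-- def _convert_properties(bleak_properties):
--     """Convert bleak properties to ESPHome format (closed form: sum of disjoint flags)."""
--     s = set(bleak_properties)
--     return (0x02 * ("read" in s)
--             + 0x04 * ("write-without-response" in s)
--             + 0x08 * ("write" in s)
--             + 0x10 * ("notify" in s)
--             + 0x20 * ("indicate" in s))
-- ===== Notes on version B (the rewrite author's own statement) =====
-- stated objective: simpler
-- what changed: B has no loop over properties at all: it builds a set of the input once and returns a closed-form arithmetic sum of the five flag*membership terms, correct because the flags are disjoint bits; A folds over the input list with dict lookups and bitwise OR.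
import Mathlib
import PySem

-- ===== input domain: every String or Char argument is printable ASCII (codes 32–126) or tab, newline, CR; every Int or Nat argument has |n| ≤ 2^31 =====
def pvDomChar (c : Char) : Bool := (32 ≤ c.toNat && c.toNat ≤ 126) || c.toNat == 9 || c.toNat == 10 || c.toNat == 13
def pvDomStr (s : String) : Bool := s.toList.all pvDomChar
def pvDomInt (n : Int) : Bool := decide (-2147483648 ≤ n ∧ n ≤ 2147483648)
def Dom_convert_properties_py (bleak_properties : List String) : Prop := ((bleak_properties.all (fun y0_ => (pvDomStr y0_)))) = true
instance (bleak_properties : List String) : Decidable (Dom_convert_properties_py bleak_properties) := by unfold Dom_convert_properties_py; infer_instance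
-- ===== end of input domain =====

-- B replaces A's fold over the input with a loop-free closed form: a set of the input once,
-- then an arithmetic sum of the five flag*membership terms (flags are disjoint bits); objective: simpler.

-- ===== PORT A =====
def propMapA : PySem.Dict String Int :=
  PySem.Dict.ofList [("read", 0x02), ("write-without-response", 0x04), ("write", 0x08),
                     ("notify", 0x10), ("indicate", 0x20)]

def convert_properties_py (bleak_properties : List String) : Int :=
  bleak_properties.foldl
    (fun properties prop =>
      if propMapA.contains prop then PySem.Int.bor properties (propMapA.getD prop 0)
      else properties) 0

-- ===== PORT B =====
-- Python's `flag * (name in s)` (bool coerced to 0/1) is ported as `flag * (if name ∈ s then 1 else 0)`.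
def convert_properties_py_alt (bleak_properties : List String) : Int :=
  let s : PySem.Set String := PySem.Set.ofList bleak_properties
  0x02 * (if "read" ∈ s then 1 else 0)
  + 0x04 * (if "write-without-response" ∈ s then 1 else 0)
  + 0x08 * (if "write" ∈ s then 1 else 0)
  + 0x10 * (if "notify" ∈ s then 1 else 0)
  + 0x20 * (if "indicate" ∈ s then 1 else 0)

-- ===== PRECONDITION & SPEC =====
def Spec_convert_properties_py (bleak_properties : List String) (out : Int) : Prop := out = convert_properties_py_alt bleak_properties
instance (bleak_properties : List String) (out : Int) : Decidable (Spec_convert_properties_py bleak_properties out) := by unfold Spec_convert_properties_py; infer_instance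

-- ===== CLAIM =====
def Claim_equal_convert_properties_py : Prop := ∀ (bleak_properties : List String), Dom_convert_properties_py bleak_properties → Spec_convert_properties_py bleak_properties (convert_properties_py bleak_properties)

-- ===== LEMMAS AND PROOFS =====

-- Nat-level flag of one property name (proof helper)
def flagN (p : String) : Nat :=
  if p = "read" then 2 else if p = "write-without-response" then 4
  else if p = "write" then 8 else if p = "notify" then 16
  else if p = "indicate" then 32 else 0

-- Nat-level mirror of A's loop
def foldAN (l : List String) (acc : Nat) : Nat := l.foldl (fun a p => a ||| flagN p) acc

-- the result as a function of the five membership facts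
def tN (l : List String) : Nat :=
  (if "read" ∈ l then 2 else 0) ||| (if "write-without-response" ∈ l then 4 else 0)
  ||| (if "write" ∈ l then 8 else 0) ||| (if "notify" ∈ l then 16 else 0)
  ||| (if "indicate" ∈ l then 32 else 0)

lemma stepA (acc : Nat) (p : String) :
    (if propMapA.contains p then PySem.Int.bor (acc : Int) (propMapA.getD p 0)
     else (acc : Int)) = ((acc ||| flagN p : Nat) : Int) := by
  by_cases h1 : p = "read"
  · subst h1; simpa [flagN] using PySem.Int.bor_natCast acc 2
  · by_cases h2 : p = "write-without-response"
    · subst h2; simpa [flagN] using PySem.Int.bor_natCast acc 4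
    · by_cases h3 : p = "write"
      · subst h3; simpa [flagN, h1, h2] using PySem.Int.bor_natCast acc 8
      · by_cases h4 : p = "notify"
        · subst h4; simpa [flagN, h1, h2, h3] using PySem.Int.bor_natCast acc 16
        · by_cases h5 : p = "indicate"
          · subst h5; simpa [flagN, h1, h2, h3, h4] using PySem.Int.bor_natCast acc 32
          · have hc : propMapA.contains p = false := by
              rw [show propMapA = PySem.Dict.mk [("read", 2), ("write-without-response", 4),
                    ("write", 8), ("notify", 16), ("indicate", 32)] from rfl]
              simp [PySem.Dict.contains_mk]
              exact ⟨Ne.symm h1, Ne.symm h2, Ne.symm h3, Ne.symm h4, Ne.symm h5⟩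
            simp [hc, flagN, h1, h2, h3, h4, h5]

lemma castA (l : List String) (acc : Nat) :
    l.foldl (fun properties prop =>
      if propMapA.contains prop then PySem.Int.bor properties (propMapA.getD prop 0)
      else properties) (acc : Int) = ((foldAN l acc : Nat) : Int) := by
  induction l generalizing acc with
  | nil => simp [foldAN]
  | cons p l ih =>
      simp only [List.foldl_cons, stepA acc p]
      simpa [foldAN] using ih (acc ||| flagN p)

lemma hoistAN (l : List String) (acc : Nat) : foldAN l acc = acc ||| foldAN l 0 := by
  induction l generalizing acc with
  | nil => simp [foldAN]
  | cons p l ih =>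
      simp only [foldAN, List.foldl_cons] at *
      rw [ih (acc ||| flagN p), ih (0 ||| flagN p), Nat.zero_or, Nat.lor_assoc]

lemma tN_cons (p : String) (l : List String) : tN (p :: l) = flagN p ||| tN l := by
  by_cases h1 : p = "read"
  · subst h1; simp [tN, flagN, List.mem_cons]; split_ifs <;> decide
  · by_cases h2 : p = "write-without-response"
    · subst h2; simp [tN, flagN, List.mem_cons]; split_ifs <;> decide
    · by_cases h3 : p = "write"
      · subst h3; simp [tN, flagN, List.mem_cons, h1, h2]; split_ifs <;> decide
      · by_cases h4 : p = "notify"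
        · subst h4; simp [tN, flagN, List.mem_cons, h1, h2, h3]; split_ifs <;> decide
        · by_cases h5 : p = "indicate"
          · subst h5; simp [tN, flagN, List.mem_cons, h1, h2, h3, h4]; split_ifs <;> decide
          · simp [tN, flagN, List.mem_cons, h1, h2, h3, h4, h5,
                  Ne.symm h1, Ne.symm h2, Ne.symm h3, Ne.symm h4, Ne.symm h5]

lemma charA (l : List String) : foldAN l 0 = tN l := by
  induction l with
  | nil => simp [foldAN, tN]
  | cons p l ih =>
      have h : foldAN (p :: l) 0 = flagN p ||| tN l := by
        rw [show foldAN (p :: l) 0 = foldAN l (0 ||| flagN p) from rfl,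
            hoistAN l (0 ||| flagN p), Nat.zero_or, ih]
      rw [h, tN_cons]

lemma charB (l : List String) : convert_properties_py_alt l = ((tN l : Nat) : Int) := by
  unfold convert_properties_py_alt
  simp only [PySem.Set.mem_ofList]
  by_cases c1 : "read" ∈ l <;> by_cases c2 : "write-without-response" ∈ l <;>
    by_cases c3 : "write" ∈ l <;> by_cases c4 : "notify" ∈ l <;> by_cases c5 : "indicate" ∈ l <;>
    simp [tN, c1, c2, c3, c4, c5]

-- ===== VERDICT =====
theorem convert_properties_py_spec : Claim_equal_convert_properties_py := by
  intro l _
  show convert_properties_py l = convert_properties_py_alt l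
  have hA : convert_properties_py l = ((foldAN l 0 : Nat) : Int) := by
    simpa [convert_properties_py] using castA l 0
  rw [hA, charA, charB]
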